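-- pv_equiv track=rewrite | github.com/goobyme/LSBF_Scrapers | Daily Programming/Daily Programmer 10.30.py | yearcount
-- ===== SOURCE A (Python) =====
-- def yearcount(year_fun):
--     yeardays = 0
--     for i in range(int(year_fun) - 1):
--         if i % 4 != 0:
--             yeardays += 365
--         elif i % 100 != 0:
--             yeardays += 366
--         elif i % 400 != 0:
--             yeardays += 365
--         else:
--             yeardays += 366
--     return yeardays
-- ===== SOURCE B (Python) =====
-- def yearcount(year_fun):
--     n = int(year_fun) - 1
--     if n <= 0:
--         return 0
--     leaps = (n + 3) // 4 - (n + 99) // 100 + (n + 399) // 400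
--     return 365 * n + leaps
-- ===== Notes on version B (the rewrite author's own statement) =====
-- stated objective: faster
-- what changed: Replaced the per-year loop that adds 365/366 according to the leap test with a closed-form formula: 365*(year-1) plus the number of leap indices below year-1 counted by ceiling divisions (n+3)//4 - (n+99)//100 + (n+399)//400.
import Mathlib
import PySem

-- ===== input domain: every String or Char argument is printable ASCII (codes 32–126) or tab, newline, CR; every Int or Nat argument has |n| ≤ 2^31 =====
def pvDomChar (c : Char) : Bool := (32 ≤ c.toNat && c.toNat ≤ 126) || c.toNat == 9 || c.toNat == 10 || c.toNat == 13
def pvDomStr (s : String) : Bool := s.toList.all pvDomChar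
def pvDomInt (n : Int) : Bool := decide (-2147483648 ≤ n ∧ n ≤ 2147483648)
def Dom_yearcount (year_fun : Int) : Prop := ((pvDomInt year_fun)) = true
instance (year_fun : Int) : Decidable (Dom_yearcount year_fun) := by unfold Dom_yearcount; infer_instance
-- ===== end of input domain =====

-- B replaces A's per-year accumulation loop with an O(1) closed-form leap count (objective: faster, asymptotic).

-- ===== PORT A =====
def yearcount (year_fun : Int) : Int :=
  (PySem.List.pyRange 0 (year_fun - 1) 1).foldl
    (fun yeardays i =>
      if PySem.Int.mod i 4 ≠ 0 then yeardays + 365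
      else if PySem.Int.mod i 100 ≠ 0 then yeardays + 366
      else if PySem.Int.mod i 400 ≠ 0 then yeardays + 365
      else yeardays + 366) 0

-- ===== PORT B =====
def yearcount_alt (year_fun : Int) : Int :=
  let n := year_fun - 1
  if n ≤ 0 then 0
  else 365 * n + PySem.Int.floordiv (n + 3) 4 - PySem.Int.floordiv (n + 99) 100
        + PySem.Int.floordiv (n + 399) 400

-- ===== PRECONDITION & SPEC =====
def Spec_yearcount (year_fun : Int) (out : Int) : Prop := out = yearcount_alt year_fun
instance (year_fun : Int) (out : Int) : Decidable (Spec_yearcount year_fun out) := by unfold Spec_yearcount; infer_instance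

-- ===== CLAIM (what is proved, stated in full; the proofs are below) =====
def Claim_equal_yearcount : Prop := ∀ (year_fun : Int), Dom_yearcount year_fun → Spec_yearcount year_fun (yearcount year_fun)

-- ===== LEMMAS AND PROOFS =====

-- Closed form of A's fold over range(n), by induction on n.
lemma yearcount_fold_closed (n : Nat) :
    (PySem.List.pyRange 0 (n : Int) 1).foldl
      (fun yeardays i =>
        if PySem.Int.mod i 4 ≠ 0 then yeardays + 365
        else if PySem.Int.mod i 100 ≠ 0 then yeardays + 366
        else if PySem.Int.mod i 400 ≠ 0 then yeardays + 365
        else yeardays + 366) 0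
    = 365 * (n : Int) + ((n : Int) + 3) / 4 - ((n : Int) + 99) / 100 + ((n : Int) + 399) / 400 := by
  induction n with
  | zero => decide
  | succ m ih =>
      rw [show ((m + 1 : Nat) : Int) = (m : Int) + 1 by push_cast; ring,
        PySem.List.pyRange_one_succ_right (by positivity), List.foldl_append, ih]
      simp only [List.foldl_cons, List.foldl_nil,
        PySem.Int.mod_eq_emod_of_pos (by norm_num : (0:Int) < 4),
        PySem.Int.mod_eq_emod_of_pos (by norm_num : (0:Int) < 100),
        PySem.Int.mod_eq_emod_of_pos (by norm_num : (0:Int) < 400)]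
      split_ifs <;> omega

-- ===== VERDICT (by name: the statement is the Claim_ definition above) =====
theorem yearcount_spec : Claim_equal_yearcount := by
  unfold Claim_equal_yearcount
  intro y _
  unfold Spec_yearcount yearcount yearcount_alt
  by_cases h : y - 1 ≤ 0
  · rw [PySem.List.pyRange_one_eq_nil h]
    simp [h]
  · obtain ⟨n, hn⟩ : ∃ n : Nat, y - 1 = (n : Int) := ⟨(y - 1).toNat, by omega⟩
    rw [hn, yearcount_fold_closed n, if_neg (by omega : ¬((n : Int) ≤ 0)),
        PySem.Int.floordiv_eq_ediv_of_pos (by norm_num : (0:Int) < 4),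
        PySem.Int.floordiv_eq_ediv_of_pos (by norm_num : (0:Int) < 100),
        PySem.Int.floordiv_eq_ediv_of_pos (by norm_num : (0:Int) < 400)]
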